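-- pv_equiv track=rewrite | github.com/menchelab/Englmaier_et_al_2025 | notebooks/codontools/plot.py | slice_sequence
-- ===== SOURCE A (Python) =====
-- def slice_sequence(
--     sequence: str,
--     cluster_coords: list[tuple[int, int]]
-- ) -> list[tuple[str, bool]]:
--     """
--     slices a string into pieces according to start, end coordinates in cluster_coords
--
--     :param sequence:        string to slice
--     :param cluster_coords:  list of start, end coordinate tuples
--
--     :return:                list of slice, is_cluster tuples where is_cluster denotes if the slice is a window cluster
--     """
--     sequence_length = len(sequence)
--     slices = []
--     prev_end = 0
--     for slice_start, slice_end in cluster_coords: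
--         slices.extend(
--             [
--                 (sequence[prev_end: slice_start], False),
--                 (sequence[slice_start: slice_end], True)
--             ]
--         )
--         prev_end = slice_end
--
--     if prev_end < sequence_length:
--         slices.append((sequence[prev_end: sequence_length], False))
--
--     return slices
-- ===== SOURCE B (Python) =====
-- def slice_sequence(
--     sequence: str,
--     cluster_coords: list[tuple[int, int]]
-- ) -> list[tuple[str, bool]]:
--     """Back-to-front assembly: pair each interval with its predecessor's end via a
--     shifted zip (no threaded prev_end state), decide the trailing piece first,
--     then walk the pairs in reverse prepending each (gap, cluster) pair."""
--     n = len(sequence)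
--     ends = [e for _, e in cluster_coords]
--     last_end = ends[-1] if ends else 0
--     out = [(sequence[last_end:n], False)] if last_end < n else []
--     for (s, e), p in reversed(list(zip(cluster_coords, [0] + ends))):
--         out = [(sequence[p:s], False), (sequence[s:e], True)] + out
--     return out
-- ===== Notes on version B (the rewrite author's own statement) =====
-- stated objective: alternative
-- what changed: Replaces A's forward loop that threads a prev_end accumulator and extends a growing list with a stateless shifted-zip pairing (each interval paired with its predecessor's end), deciding the trailing piece first and assembling the result back-to-front by prepending while walking the pairs in reverse.
import Mathlib
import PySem

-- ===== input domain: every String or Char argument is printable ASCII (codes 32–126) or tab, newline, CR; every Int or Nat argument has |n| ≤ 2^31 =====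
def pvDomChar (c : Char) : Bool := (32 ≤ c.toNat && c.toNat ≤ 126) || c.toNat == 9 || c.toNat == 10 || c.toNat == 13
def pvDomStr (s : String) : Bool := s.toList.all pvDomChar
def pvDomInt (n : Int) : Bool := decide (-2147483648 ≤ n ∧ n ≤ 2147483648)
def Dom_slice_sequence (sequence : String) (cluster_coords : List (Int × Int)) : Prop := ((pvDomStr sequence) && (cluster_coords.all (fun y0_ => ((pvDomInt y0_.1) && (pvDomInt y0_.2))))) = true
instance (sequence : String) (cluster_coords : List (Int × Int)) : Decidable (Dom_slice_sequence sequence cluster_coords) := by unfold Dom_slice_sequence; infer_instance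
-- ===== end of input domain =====

-- ===== PORT A =====
-- B replaces A's forward prev_end-threading loop by a shifted-zip pairing walked in reverse,
-- assembling the result back-to-front (alternative decomposition, same cost class).
def slice_sequence (sequence : String) (cluster_coords : List (Int × Int)) : List (String × Bool) :=
  let sequence_length : Int := PySem.Str.len sequence
  let st := cluster_coords.foldl
    (fun (st : List (String × Bool) × Int) (c : Int × Int) =>
      (st.1 ++ [(PySem.Str.slice sequence (some st.2) (some c.1), false),
                (PySem.Str.slice sequence (some c.1) (some c.2), true)], c.2))
    ([], (0 : Int))
  if st.2 < sequence_length then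
    st.1 ++ [(PySem.Str.slice sequence (some st.2) (some sequence_length), false)]
  else st.1

-- ===== PORT B =====
def slice_sequence_alt (sequence : String) (cluster_coords : List (Int × Int)) : List (String × Bool) :=
  let n : Int := PySem.Str.len sequence
  let ends := cluster_coords.map (fun c => c.2)
  let last_end := ends.getLastD 0   -- ends[-1] if ends else 0
  let out0 : List (String × Bool) :=
    if last_end < n then [(PySem.Str.slice sequence (some last_end) (some n), false)] else []
  ((cluster_coords.zip ((0 : Int) :: ends)).reverse).foldl
    (fun out (q : (Int × Int) × Int) =>
      (PySem.Str.slice sequence (some q.2) (some q.1.1), false)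
        :: (PySem.Str.slice sequence (some q.1.1) (some q.1.2), true) :: out)
    out0

-- ===== PRECONDITION & SPEC =====
def Spec_slice_sequence (sequence : String) (cluster_coords : List (Int × Int)) (out : List (String × Bool)) : Prop := out = slice_sequence_alt sequence cluster_coords
instance (sequence : String) (cluster_coords : List (Int × Int)) (out : List (String × Bool)) : Decidable (Spec_slice_sequence sequence cluster_coords out) := by unfold Spec_slice_sequence; infer_instance

-- ===== CLAIM =====
def Claim_equal_slice_sequence : Prop := ∀ (sequence : String) (cluster_coords : List (Int × Int)), Dom_slice_sequence sequence cluster_coords → Spec_slice_sequence sequence cluster_coords (slice_sequence sequence cluster_coords)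

-- ===== LEMMAS AND PROOFS =====

-- the interleaved (gap, cluster) slices produced from a running start p
def pvSegs (sequence : String) (p : Int) : List (Int × Int) → List (String × Bool)
  | [] => []
  | c :: cc =>
      (PySem.Str.slice sequence (some p) (some c.1), false)
        :: (PySem.Str.slice sequence (some c.1) (some c.2), true)
        :: pvSegs sequence c.2 cc

-- the final prev_end
def pvLastE (p : Int) : List (Int × Int) → Int
  | [] => p
  | c :: cc => pvLastE c.2 cc

theorem pvA_fold (sequence : String) (cc : List (Int × Int)) :
    ∀ (acc : List (String × Bool)) (p : Int),
      cc.foldl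
        (fun (st : List (String × Bool) × Int) (c : Int × Int) =>
          (st.1 ++ [(PySem.Str.slice sequence (some st.2) (some c.1), false),
                    (PySem.Str.slice sequence (some c.1) (some c.2), true)], c.2))
        (acc, p)
      = (acc ++ pvSegs sequence p cc, pvLastE p cc) := by
  induction cc with
  | nil => intro acc p; simp [pvSegs, pvLastE]
  | cons c cc ih =>
      intro acc p
      simp only [List.foldl_cons, ih, pvSegs, pvLastE]
      simp

-- the zip of the coordinates with the shifted ends list threads exactly the prev_end chain
def pvZipPrev (p : Int) : List (Int × Int) → List ((Int × Int) × Int)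
  | [] => []
  | c :: cc => (c, p) :: pvZipPrev c.2 cc

theorem pvZip_shift (cc : List (Int × Int)) : ∀ (p : Int),
    cc.zip (p :: cc.map (fun c => c.2)) = pvZipPrev p cc := by
  induction cc with
  | nil => intro p; simp [pvZipPrev]
  | cons c cc ih => intro p; simp [pvZipPrev, ih]

theorem pvB_foldr (sequence : String) (cc : List (Int × Int)) :
    ∀ (p : Int) (init : List (String × Bool)),
      (pvZipPrev p cc).foldr
        (fun (q : (Int × Int) × Int) out =>
          (PySem.Str.slice sequence (some q.2) (some q.1.1), false)
            :: (PySem.Str.slice sequence (some q.1.1) (some q.1.2), true) :: out)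
        init
      = pvSegs sequence p cc ++ init := by
  induction cc with
  | nil => intro p init; simp [pvZipPrev, pvSegs]
  | cons c cc ih => intro p init; simp [pvZipPrev, pvSegs, ih]

theorem pvLast_ends (cc : List (Int × Int)) : ∀ (p : Int),
    (cc.map (fun c => c.2)).getLastD p = pvLastE p cc := by
  induction cc with
  | nil => intro p; simp [pvLastE]
  | cons c cc ih =>
      intro p
      simp only [List.map_cons, pvLastE, List.getLastD_cons]
      exact ih c.2

-- ===== VERDICT =====
theorem slice_sequence_spec : Claim_equal_slice_sequence := by
  intro sequence cc _
  unfold Spec_slice_sequence slice_sequence slice_sequence_alt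
  rw [pvA_fold sequence cc [] 0]
  dsimp only
  rw [pvZip_shift cc 0, List.foldl_reverse]
  have hb := pvB_foldr sequence cc 0
  simp only [pvLast_ends cc 0]
  split_ifs with h
  · rw [hb]; simp
  · rw [hb]; simp
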